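-- pv_equiv track=rewrite | github.com/kitakou0313/cracking-the-code-interview | cracking-the-code-interview/chap8_2.py | path_through_grid
-- ===== SOURCE A (Python) =====
-- class Queue():
--     def __init__(self):
--         self.array = []
--
--     def add(self, item):
--         self.array.append(item)
--
--     def isEmpty(self):
--         return len(self.array) == 0
--
--     def remove(self):
--         if not len(self.array):
--             return None
--         item = self.array[0]
--         del self.array[0]
--         return item
--
-- def path_through_grid(grid):
--     q = Queue()
--     R = len(grid)
--     C = len(grid[0])
--     isVisited = set([])
--
--     q.add((0, 0))
--     isVisited.add((0, 0))
--
--     gridPaths = [[[] for c in range(C)] for r in range(R)]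
--
--     gridPaths[0][0] = ["start"]
--
--     while not(q.isEmpty()):
--         now = q.remove()
--
--         for nxtVec in [(0, 1), (1, 0)]:
--             nxtPos = (now[0] + nxtVec[0], now[1] + nxtVec[1])
--             if nxtPos[0] < R and nxtPos[1] < C and (not (nxtPos in isVisited)) and grid[nxtPos[0]][nxtPos[1]] != 1:
--                 q.add(nxtPos)
--                 isVisited.add(nxtPos)
--
--                 gridPaths[nxtPos[0]][nxtPos[1]] = gridPaths[now[0]
--                                                             ][now[1]] + ["right" if nxtVec == (0, 1) else "down"]
--
--         if now == (R-1, C-1):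
--             gridPaths[R - 1][C - 1].append("end")
--             return gridPaths[R - 1][C - 1]
--
--     return None
-- ===== SOURCE B (Python) =====
-- def path_through_grid(grid):
--     R = len(grid)
--     C = len(grid[0])
--     goal = (R - 1, C - 1)
--     parent = {(0, 0): None}          # pos -> None (start) or (parent pos, move)
--     q = [(0, 0)]
--     head = 0
--     while head < len(q):
--         r, c = q[head]
--         head += 1
--         if (r, c) == goal:
--             moves = []
--             cur = goal
--             while parent[cur] is not None:
--                 p, m = parent[cur]
--                 moves.append(m)
--                 cur = p
--             moves.reverse()
--             return ["start"] + moves + ["end"]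
--         for nr, nc, m in ((r, c + 1, "right"), (r + 1, c, "down")):
--             if nr < R and nc < C and (nr, nc) not in parent and grid[nr][nc] != 1:
--                 parent[(nr, nc)] = ((r, c), m)
--                 q.append((nr, nc))
--     return None
-- ===== Notes on version B (the rewrite author's own statement) =====
-- stated objective: faster
-- what changed: Replaces the O(n) pop-from-front queue and the per-cell full path lists (parent path copied into every discovered cell) with an index-pointer queue and parent pointers, reconstructing the move sequence once at the end.
-- outside the precondition, e.g. on path_through_grid([[0, 1], [1]]): A returns None, B returns None
import Mathlib
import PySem

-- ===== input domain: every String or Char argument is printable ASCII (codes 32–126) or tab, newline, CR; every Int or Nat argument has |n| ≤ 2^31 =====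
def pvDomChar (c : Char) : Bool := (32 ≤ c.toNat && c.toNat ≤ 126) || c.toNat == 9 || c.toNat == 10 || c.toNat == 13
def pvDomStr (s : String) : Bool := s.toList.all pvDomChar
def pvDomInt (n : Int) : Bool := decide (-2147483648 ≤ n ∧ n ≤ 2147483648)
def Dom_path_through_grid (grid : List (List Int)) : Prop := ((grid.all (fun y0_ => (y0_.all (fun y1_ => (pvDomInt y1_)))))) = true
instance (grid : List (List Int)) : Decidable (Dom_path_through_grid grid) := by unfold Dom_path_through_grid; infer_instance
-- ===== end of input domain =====

-- B replaces A's O(n) pop-from-front queue and per-cell copied path lists with an index-pointer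
-- queue and parent pointers (path reconstructed once at the end); return value proved equal on Pre_.
-- Grid coordinates in both programs start at (0,0) and only ever grow by +1, so they are
-- transliterated as Nat × Nat; list lengths are Nat as in Lean.

-- ===== PORT A =====
-- grid[r][c]; always in range when reached under Pre_ (guards r < R, c < C and Pre_'s row-length bound)
def pvGV (grid : List (List Int)) (r c : Nat) : Int := (grid.getD r []).getD c 0

-- gridPaths[r][c] read / write (indices in range whenever executed under Pre_)
def pvGetCell (paths : List (List (List String))) (r c : Nat) : List String :=
  (paths.getD r []).getD c []
def pvSetCell (paths : List (List (List String))) (r c : Nat) (v : List String) :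
    List (List (List String)) :=
  paths.set r ((paths.getD r []).set c v)

-- body of A's `for nxtVec in [(0, 1), (1, 0)]` loop, state = (queue tail, isVisited, gridPaths)
def pvStepA (grid : List (List Int)) (R C : Nat) (now : Nat × Nat)
    (st : List (Nat × Nat) × PySem.Set (Nat × Nat) × List (List (List String)))
    (vec : Nat × Nat) :
    List (Nat × Nat) × PySem.Set (Nat × Nat) × List (List (List String)) :=
  let nxt : Nat × Nat := (now.1 + vec.1, now.2 + vec.2)
  if nxt.1 < R ∧ nxt.2 < C ∧ ¬ nxt ∈ st.2.1 ∧ pvGV grid nxt.1 nxt.2 ≠ 1 then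
    (st.1 ++ [nxt], PySem.Set.add st.2.1 nxt,
     pvSetCell st.2.2 nxt.1 nxt.2
       (pvGetCell st.2.2 now.1 now.2 ++ [if vec = ((0 : Nat), (1 : Nat)) then "right" else "down"]))
  else st

-- A's `while not q.isEmpty()` loop; fuel only makes it total (never exhausted: each iteration
-- dequeues one of at most R*C ever-enqueued, pairwise-distinct visited cells)
def pvLoopA (grid : List (List Int)) (R C : Nat) :
    Nat → List (Nat × Nat) → PySem.Set (Nat × Nat) → List (List (List String)) →
    Option (List String)
  | 0, _, _, _ => none
  | fuel + 1, q, vis, paths =>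
    match q with
    | [] => none
    | now :: rest =>
      let st := [((0 : Nat), (1 : Nat)), ((1 : Nat), (0 : Nat))].foldl (pvStepA grid R C now) (rest, vis, paths)
      if now = (R - 1, C - 1) then
        some (pvGetCell st.2.2 (R - 1) (C - 1) ++ ["end"])
      else
        pvLoopA grid R C fuel st.1 st.2.1 st.2.2

def path_through_grid (grid : List (List Int)) : Option (List String) :=
  let R := grid.length
  let C := (grid.headD []).length  -- len(grid[0]); the IndexError on an empty grid is excluded by Pre_
  pvLoopA grid R C (R * C + 1) [((0 : Nat), (0 : Nat))]
    (PySem.Set.add PySem.Set.empty ((0 : Nat), (0 : Nat)))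
    (pvSetCell (List.replicate R (List.replicate C ([] : List String))) 0 0 ["start"])

-- ===== PORT B =====
-- B's reconstruction loop `while parent[cur] is not None`; a missing key (KeyError in Python)
-- stops the loop — parent[cur] is always present when this runs; fuel only makes it total
def pvReconB (parent : PySem.Dict (Nat × Nat) (Option ((Nat × Nat) × String))) :
    Nat → (Nat × Nat) → List String → List String
  | 0, _, moves => moves
  | f + 1, cur, moves =>
    match parent.get? cur with
    | some (some (p, m)) => pvReconB parent f p (moves ++ [m])
    | _ => moves

-- body of B's `for nr, nc, m in ...` loop, state = (parent, q)
def pvStepB (grid : List (List Int)) (R C : Nat) (now : Nat × Nat)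
    (st : PySem.Dict (Nat × Nat) (Option ((Nat × Nat) × String)) × List (Nat × Nat))
    (t : Nat × Nat × String) :
    PySem.Dict (Nat × Nat) (Option ((Nat × Nat) × String)) × List (Nat × Nat) :=
  if t.1 < R ∧ t.2.1 < C ∧ ¬ st.1.contains (t.1, t.2.1) = true ∧ pvGV grid t.1 t.2.1 ≠ 1 then
    (st.1.insert (t.1, t.2.1) (some (now, t.2.2)), st.2 ++ [(t.1, t.2.1)])
  else st

-- B's `while head < len(q)` loop; fuel only makes it total (same bound as A's loop)
def pvLoopB (grid : List (List Int)) (R C : Nat) :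
    Nat → PySem.Dict (Nat × Nat) (Option ((Nat × Nat) × String)) → List (Nat × Nat) → Nat →
    Option (List String)
  | 0, _, _, _ => none
  | fuel + 1, parent, q, head =>
    if head < q.length then
      let now := q.getD head (0, 0)
      -- Python compares (r, c) == (R-1, C-1) over ints, so the comparison is over Int here
      if ((now.1 : Int), (now.2 : Int)) = ((R : Int) - 1, (C : Int) - 1) then
        some (["start"] ++ (pvReconB parent (PySem.Dict.size parent + 1) (R - 1, C - 1) []).reverse ++ ["end"])
      else
        let st := [(now.1, now.2 + 1, "right"), (now.1 + 1, now.2, "down")].foldl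
          (pvStepB grid R C now) (parent, q)
        pvLoopB grid R C fuel st.1 st.2 (head + 1)
    else none

def path_through_grid_alt (grid : List (List Int)) : Option (List String) :=
  let R := grid.length
  let C := (grid.headD []).length
  pvLoopB grid R C (R * C + 1)
    (PySem.Dict.insert PySem.Dict.empty ((0 : Nat), (0 : Nat)) none)
    [((0 : Nat), (0 : Nat))] 0

-- ===== PRECONDITION & SPEC =====
-- Pre_ excludes the empty grid and an empty first row (A raises IndexError before the search) and
-- grids having a row shorter than the first row: on those A raises IndexError whenever the search
-- probes a missing cell, and on the remaining ones (short row never probed) both programs return None.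
def Pre_path_through_grid (grid : List (List Int)) : Prop :=
  grid ≠ [] ∧ (grid.headD []).length ≠ 0 ∧ ∀ row ∈ grid, (grid.headD []).length ≤ row.length
instance (grid : List (List Int)) : Decidable (Pre_path_through_grid grid) := by
  unfold Pre_path_through_grid; infer_instance

def pvWitness_path_through_grid : List (List Int) := [[0, 0], [1, 0]]

def Spec_path_through_grid (grid : List (List Int)) (out : Option (List String)) : Prop := out = path_through_grid_alt grid
instance (grid : List (List Int)) (out : Option (List String)) : Decidable (Spec_path_through_grid grid out) := by unfold Spec_path_through_grid; infer_instance

-- ===== CLAIM (what is proved, stated in full; the proofs are below) =====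
def Claim_equal_path_through_grid : Prop := ∀ (grid : List (List Int)), Dom_path_through_grid grid → Pre_path_through_grid grid → Spec_path_through_grid grid (path_through_grid grid)

-- ===== LEMMAS AND PROOFS =====

-- parent-pointer chains of B: `pvReach parent p ms` = following parent pointers from p
-- back to the start collects exactly the move list ms (in start-to-p order)
inductive pvReach (parent : PySem.Dict (Nat × Nat) (Option ((Nat × Nat) × String))) :
    (Nat × Nat) → List String → Prop
  | root {p : Nat × Nat} : parent.get? p = some none → pvReach parent p []
  | step {p pp : Nat × Nat} {m : String} {ms : List String} :
      parent.get? p = some (some (pp, m)) → pvReach parent pp ms → pvReach parent p (ms ++ [m])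

theorem pvReconB_acc (parent : PySem.Dict (Nat × Nat) (Option ((Nat × Nat) × String))) :
    ∀ (f : Nat) (cur : Nat × Nat) (acc : List String),
      pvReconB parent f cur acc = acc ++ pvReconB parent f cur [] := by
  intro f
  induction f with
  | zero => intro cur acc; simp [pvReconB]
  | succ f ih =>
    intro cur acc
    match h : parent.get? cur with
    | some (some (p, m)) =>
      simp only [pvReconB, h]
      rw [ih p (acc ++ [m]), ih p ([] ++ [m])]; simp
    | some none => simp [pvReconB, h]
    | none => simp [pvReconB, h]

theorem pvReach_recon (parent : PySem.Dict (Nat × Nat) (Option ((Nat × Nat) × String)))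
    {cur : Nat × Nat} {ms : List String} (h : pvReach parent cur ms) :
    ∀ f : Nat, ms.length < f → pvReconB parent f cur [] = ms.reverse := by
  induction h with
  | root hget =>
    intro f hf
    match f, hf with
    | f + 1, _ => simp [pvReconB, hget]
  | step hget _ ih =>
    intro f hf
    match f, hf with
    | f + 1, hf =>
      simp only [pvReconB, hget]
      rw [pvReconB_acc, ih f (by simp at hf ⊢; omega)]
      simp

theorem pvReach_insert_fresh {parent : PySem.Dict (Nat × Nat) (Option ((Nat × Nat) × String))}
    {k : Nat × Nat} {v : Option ((Nat × Nat) × String)} {p : Nat × Nat} {ms : List String}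
    (hk : parent.contains k = false) (h : pvReach parent p ms) :
    pvReach (parent.insert k v) p ms := by
  induction h with
  | root hget =>
    refine pvReach.root ?_
    rw [PySem.Dict.get?_insert_of_ne parent v ?_, hget]
    intro hpk; rw [hpk, (PySem.Dict.get?_eq_none_iff_contains parent k).2 hk] at hget; cases hget
  | step hget _ ih =>
    refine pvReach.step ?_ ih
    rw [PySem.Dict.get?_insert_of_ne parent v ?_, hget]
    intro hpk; rw [hpk, (PySem.Dict.get?_eq_none_iff_contains parent k).2 hk] at hget; cases hget

-- the per-visited-cell invariant: A's gridPaths entry is "start" :: the chain of B's parent dict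
def pvKeyInv (R C : Nat) (paths : List (List (List String)))
    (parent : PySem.Dict (Nat × Nat) (Option ((Nat × Nat) × String))) : Prop :=
  ∀ p : Nat × Nat, parent.contains p = true →
    p.1 < R ∧ p.2 < C ∧ ∃ ms : List String, pvReach parent p ms ∧
      pvGetCell paths p.1 p.2 = "start" :: ms ∧ ms.length < PySem.Dict.size parent

-- the loop invariant tying A's state (qA, vis, paths) to B's state (parent, qB, head)
def pvInv (R C : Nat) (qA : List (Nat × Nat)) (vis : PySem.Set (Nat × Nat))
    (paths : List (List (List String)))
    (parent : PySem.Dict (Nat × Nat) (Option ((Nat × Nat) × String)))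
    (qB : List (Nat × Nat)) (head : Nat) : Prop :=
  head ≤ qB.length ∧ qA = qB.drop head ∧
  (∀ p : Nat × Nat, p ∈ vis ↔ parent.contains p = true) ∧
  (∀ p ∈ qA, parent.contains p = true) ∧
  paths.length = R ∧ (∀ row ∈ paths, row.length = C) ∧ pvKeyInv R C paths parent

-- the same relation in the middle of one iteration, after `now` has been dequeued
def pvRel (R C : Nat) (now : Nat × Nat)
    (a : List (Nat × Nat) × PySem.Set (Nat × Nat) × List (List (List String)))
    (b : PySem.Dict (Nat × Nat) (Option ((Nat × Nat) × String)) × List (Nat × Nat))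
    (head : Nat) : Prop :=
  head + 1 ≤ b.2.length ∧ a.1 = b.2.drop (head + 1) ∧
  (∀ p : Nat × Nat, p ∈ a.2.1 ↔ b.1.contains p = true) ∧
  (∀ p ∈ a.1, b.1.contains p = true) ∧
  a.2.2.length = R ∧ (∀ row ∈ a.2.2, row.length = C) ∧ pvKeyInv R C a.2.2 b.1 ∧
  b.1.contains now = true

theorem pvGetCell_setCell_ne (paths : List (List (List String))) (r c : Nat) (v : List String)
    (r' c' : Nat) (h : (r', c') ≠ (r, c)) :
    pvGetCell (pvSetCell paths r c v) r' c' = pvGetCell paths r' c' := by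
  unfold pvGetCell pvSetCell
  simp only [List.getD_eq_getElem?_getD]
  by_cases hr : r = r'
  · subst hr
    have hc : c ≠ c' := by intro hc; exact h (by rw [hc])
    by_cases hlt : r < paths.length
    · rw [List.getElem?_set_self hlt]
      simp [List.getElem?_set_ne hc]
    · rw [List.set_eq_of_length_le (by omega)]
  · rw [List.getElem?_set_ne hr]

theorem pvGetCell_setCell_self (paths : List (List (List String))) (r c : Nat) (v : List String)
    (hr : r < paths.length) (hc : c < (paths.getD r []).length) :
    pvGetCell (pvSetCell paths r c v) r c = v := by
  unfold pvGetCell pvSetCell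
  have hc' : c < (paths[r]?.getD []).length := by rwa [List.getD_eq_getElem?_getD] at hc
  simp only [List.getD_eq_getElem?_getD]
  rw [List.getElem?_set_self hr]
  simp [List.getElem?_set_self hc']

-- one expansion step (one direction) preserves the mid-iteration relation
theorem pvStep_rel (grid : List (List Int)) (R C : Nat) (now : Nat × Nat)
    (a : List (Nat × Nat) × PySem.Set (Nat × Nat) × List (List (List String)))
    (b : PySem.Dict (Nat × Nat) (Option ((Nat × Nat) × String)) × List (Nat × Nat))
    (head : Nat) (dr dc : Nat) (m : String)
    (hm : (if ((dr, dc) : Nat × Nat) = ((0 : Nat), (1 : Nat)) then "right" else "down") = m)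
    (h : pvRel R C now a b head) :
    pvRel R C now (pvStepA grid R C now a (dr, dc))
      (pvStepB grid R C now b (now.1 + dr, now.2 + dc, m)) head := by
  obtain ⟨qA, vis, paths⟩ := a
  obtain ⟨parent, qB⟩ := b
  obtain ⟨h1, h2, h3, h4, h5, h6, h7, hnow⟩ := h
  dsimp only at h1 h2 h3 h4 h5 h6 h7 hnow
  simp only [pvStepA, pvStepB]
  by_cases hGB : now.1 + dr < R ∧ now.2 + dc < C ∧
      ¬ parent.contains (now.1 + dr, now.2 + dc) = true ∧ pvGV grid (now.1 + dr) (now.2 + dc) ≠ 1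
  · have hGBkeep := hGB
    obtain ⟨hb1, hb2, hb3, hb4⟩ := hGB
    have hfresh : parent.contains (now.1 + dr, now.2 + dc) = false := by
      simpa using hb3
    have hvis : ¬ ((now.1 + dr, now.2 + dc) : Nat × Nat) ∈ vis := fun hv => hb3 ((h3 _).1 hv)
    have hGA : now.1 + dr < R ∧ now.2 + dc < C ∧
        ¬ ((now.1 + dr, now.2 + dc) : Nat × Nat) ∈ vis ∧
        pvGV grid (now.1 + dr) (now.2 + dc) ≠ 1 := ⟨hb1, hb2, hvis, hb4⟩
    rw [if_pos hGA, if_pos hGBkeep]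
    obtain ⟨hnR, hnC, msN, hreachN, hcellN, hlenN⟩ := h7 now hnow
    have hsize : PySem.Dict.size (parent.insert (now.1 + dr, now.2 + dc) (some (now, m)))
        = PySem.Dict.size parent + 1 := by
      rw [PySem.Dict.size_insert, if_neg (by simp [hfresh])]
    have hpathlen : (paths.getD (now.1 + dr) []).length = C := by
      apply h6
      have hlt : now.1 + dr < paths.length := h5 ▸ hb1
      rw [List.getD_eq_getElem?_getD, List.getElem?_eq_getElem hlt]
      exact List.getElem_mem hlt
    refine ⟨?_, ?_, ?_, ?_, ?_, ?_, ?_, ?_⟩ <;> dsimp only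
    · simp; omega
    · rw [List.drop_append_of_le_length h1, ← h2]
    · intro p
      rw [PySem.Set.mem_add, PySem.Dict.contains_insert]
      simp only [Bool.or_eq_true, beq_iff_eq, h3 p]
      tauto
    · intro p hp
      rw [PySem.Dict.contains_insert]
      rcases List.mem_append.1 hp with hp | hp
      · simp [h4 p hp]
      · simp at hp; simp [hp]
    · unfold pvSetCell; rw [List.length_set]; exact h5
    · intro row hrow
      unfold pvSetCell at hrow
      rcases List.mem_or_eq_of_mem_set hrow with hrow | hrow
      · exact h6 row hrow
      · rw [hrow, List.length_set]; exact hpathlen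
    · intro p hp
      rw [PySem.Dict.contains_insert] at hp
      simp only [Bool.or_eq_true, beq_iff_eq] at hp
      rcases hp with hp | hp
      · subst hp
        refine ⟨hb1, hb2, msN ++ [m], ?_, ?_, ?_⟩
        · exact pvReach.step (PySem.Dict.get?_insert_self parent _ _)
            (pvReach_insert_fresh hfresh hreachN)
        · rw [pvGetCell_setCell_self paths _ _ _ (h5 ▸ hb1) (hpathlen ▸ hb2), hcellN, ← hm]
          simp
        · rw [hsize]; simp; omega
      · obtain ⟨hp1, hp2, ms, hre, hcell, hlen⟩ := h7 p hp
        have hpne : p ≠ (now.1 + dr, now.2 + dc) := by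
          intro e; rw [e, hfresh] at hp; cases hp
        refine ⟨hp1, hp2, ms, pvReach_insert_fresh hfresh hre, ?_, ?_⟩
        · rw [show pvGetCell (pvSetCell paths (now.1 + dr) (now.2 + dc) _) p.1 p.2
              = pvGetCell paths p.1 p.2 from
            pvGetCell_setCell_ne _ _ _ _ _ _ (by simpa [Prod.ext_iff] using hpne)]
          exact hcell
        · rw [hsize]; omega
    · rw [PySem.Dict.contains_insert]; simp [hnow]
  · rw [if_neg ?_, if_neg hGB]
    · exact ⟨h1, h2, h3, h4, h5, h6, h7, hnow⟩
    · intro hGA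
      exact hGB ⟨hGA.1, hGA.2.1, fun hc => hGA.2.2.1 ((h3 _).2 hc), hGA.2.2.2⟩

-- dequeuing: the loop invariant yields the mid-iteration relation
theorem pvInv_dequeue {R C : Nat} {now : Nat × Nat} {rest : List (Nat × Nat)}
    {vis : PySem.Set (Nat × Nat)} {paths : List (List (List String))}
    {parent : PySem.Dict (Nat × Nat) (Option ((Nat × Nat) × String))}
    {qB : List (Nat × Nat)} {head : Nat}
    (h : pvInv R C (now :: rest) vis paths parent qB head) :
    pvRel R C now (rest, vis, paths) (parent, qB) head := by
  obtain ⟨h1, h2, h3, h4, h5, h6, h7⟩ := h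
  have hL : head + 1 ≤ qB.length := by
    have := congrArg List.length h2
    simp [List.length_drop] at this
    omega
  refine ⟨hL, ?_, h3, fun p hp => h4 p (by simp [hp]), h5, h6, h7, h4 now (by simp)⟩
  have := congrArg List.tail h2
  simpa [List.tail_drop] using this

theorem pvRel_to_inv {R C : Nat} {now : Nat × Nat}
    {a : List (Nat × Nat) × PySem.Set (Nat × Nat) × List (List (List String))}
    {b : PySem.Dict (Nat × Nat) (Option ((Nat × Nat) × String)) × List (Nat × Nat)}
    {head : Nat} (h : pvRel R C now a b head) :
    pvInv R C a.1 a.2.1 a.2.2 b.1 b.2 (head + 1) :=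
  ⟨h.1, h.2.1, h.2.2.1, h.2.2.2.1, h.2.2.2.2.1, h.2.2.2.2.2.1, h.2.2.2.2.2.2.1⟩

-- lockstep equivalence of the two loops
theorem pvLoop_eq (grid : List (List Int)) (R C : Nat) (hR : 0 < R) (hC : 0 < C) :
    ∀ (fuel : Nat) (qA : List (Nat × Nat)) (vis : PySem.Set (Nat × Nat))
      (paths : List (List (List String)))
      (parent : PySem.Dict (Nat × Nat) (Option ((Nat × Nat) × String)))
      (qB : List (Nat × Nat)) (head : Nat),
      pvInv R C qA vis paths parent qB head →
      pvLoopA grid R C fuel qA vis paths = pvLoopB grid R C fuel parent qB head := by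
  intro fuel
  induction fuel with
  | zero => intro qA vis paths parent qB head _; rfl
  | succ fuel ih =>
    intro qA vis paths parent qB head hinv
    have h2 := hinv.2.1
    cases qA with
    | nil =>
      have hge : ¬ head < qB.length := by
        have := congrArg List.length h2
        simp [List.length_drop] at this
        omega
      simp only [pvLoopA, pvLoopB]
      rw [if_neg hge]
    | cons now rest =>
      have hrel := pvInv_dequeue hinv
      have hlt : head < qB.length := hrel.1
      have hget : qB.getD head (0, 0) = now := by
        have h0 : (qB.drop head)[0]? = some now := by rw [← h2]; rfl
        rw [List.getElem?_drop] at h0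
        rw [List.getD_eq_getElem?_getD]
        simpa using congrArg (Option.getD · (0, 0)) h0
      simp only [pvLoopA, pvLoopB]
      rw [if_pos hlt, hget]
      by_cases hgoal : now = (R - 1, C - 1)
      · have hgoalB : ((now.1 : Int), (now.2 : Int)) = (((R : Nat) : Int) - 1, ((C : Nat) : Int) - 1) := by
          rw [hgoal]; simp [Prod.ext_iff]; omega
        rw [if_pos hgoal, if_pos hgoalB]
        have hstep1 : pvStepA grid R C now (rest, vis, paths) ((0 : Nat), (1 : Nat))
            = (rest, vis, paths) := by
          rw [hgoal]; unfold pvStepA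
          rw [if_neg (fun hcond => absurd hcond.2.1 (by simp; omega))]
        have hstep2 : pvStepA grid R C now (rest, vis, paths) ((1 : Nat), (0 : Nat))
            = (rest, vis, paths) := by
          rw [hgoal]; unfold pvStepA
          rw [if_neg (fun hcond => absurd hcond.1 (by simp; omega))]
        simp only [List.foldl, hstep1, hstep2]
        have hcont : parent.contains (R - 1, C - 1) = true := by
          rw [← hgoal]; exact hinv.2.2.2.1 now (by simp)
        obtain ⟨_, _, ms, hre, hcell, hlen⟩ := hinv.2.2.2.2.2.2 _ hcont
        rw [hcell, pvReach_recon parent hre (PySem.Dict.size parent + 1) (by omega),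
          List.reverse_reverse]
        simp
      · have hgoalB : ¬ (((now.1 : Int), (now.2 : Int)) = (((R : Nat) : Int) - 1, ((C : Nat) : Int) - 1)) := by
          simp only [Prod.ext_iff] at hgoal ⊢
          intro hc
          exact hgoal ⟨by omega, by omega⟩
        rw [if_neg hgoal, if_neg hgoalB]
        have hrel1 := pvStep_rel grid R C now (rest, vis, paths) (parent, qB) head 0 1 "right"
          (by simp) hrel
        have hrel2 := pvStep_rel grid R C now _ _ head 1 0 "down" (by decide) hrel1
        simp only [Nat.add_zero] at hrel1 hrel2
        simp only [List.foldl]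
        exact ih _ _ _ _ _ _ (pvRel_to_inv hrel2)

-- ===== VERDICT (by name: the statement is the Claim_ definition above) =====
theorem path_through_grid_spec : Claim_equal_path_through_grid := by
  intro grid _ hpre
  obtain ⟨hne, hC0, _⟩ := hpre
  unfold Spec_path_through_grid path_through_grid path_through_grid_alt
  have hR : 0 < grid.length := by cases grid with
    | nil => exact absurd rfl hne
    | cons a l => simp
  have hC : 0 < (grid.headD []).length := Nat.pos_of_ne_zero hC0
  apply pvLoop_eq grid grid.length (grid.headD []).length hR hC
  have hrow0 : (List.replicate grid.length (List.replicate (grid.headD []).length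
      ([] : List String))).getD 0 [] = List.replicate (grid.headD []).length [] := by
    rw [List.getD_eq_getElem?_getD, List.getElem?_replicate]
    simp [hR]
  refine ⟨by simp, rfl, ?_, ?_, ?_, ?_, ?_⟩
  · intro p
    rw [PySem.Set.mem_add, PySem.Dict.contains_insert]
    simp only [PySem.Set.empty, List.not_mem_nil, false_or, PySem.Dict.contains_empty,
      Bool.or_false, beq_iff_eq]
  · intro p hp
    simp only [List.mem_singleton] at hp
    subst hp
    rw [PySem.Dict.contains_insert]; simp
  · unfold pvSetCell; simp
  · intro row hrow
    unfold pvSetCell at hrow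
    rcases List.mem_or_eq_of_mem_set hrow with hrow | hrow
    · rw [List.eq_of_mem_replicate hrow]; simp
    · rw [hrow, List.length_set, hrow0]; simp
  · intro p hp
    rw [PySem.Dict.contains_insert] at hp
    simp only [PySem.Dict.contains_empty, Bool.or_eq_true, beq_iff_eq] at hp
    rcases hp with hp | hp
    · subst hp
      refine ⟨hR, hC, [], pvReach.root (PySem.Dict.get?_insert_self _ _ _), ?_, ?_⟩
      · rw [pvGetCell_setCell_self _ _ _ _ (by simpa using hR) (by rw [hrow0]; simpa using hC)]
      · rw [PySem.Dict.size_insert, if_neg (by simp)]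
        simp
    · cases hp
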